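-- pv_equiv track=rewrite | github.com/MDEGroup/APIRecSys-AML | UPMiner_PAM/injector/injector.py | inject_PAM
-- ===== SOURCE A (Python) =====
-- def generate_fake_content(declaration,api_fake):
--     temp_list=[]
--
--     temp_list.append(declaration)
--     temp_list.append(api_fake)
--
--     return temp_list
--
-- def inject_PAM(arff_obj, half_decl,api, api2):
--     list_decl = []
--     for i in range(0, half_decl):
--
--         splitted = str(arff_obj['data'][i]).split("', '")
--         list_decl.append(splitted[0].replace("['", ""))
--
--
--     list_decl = list(dict.fromkeys(list_decl))
--     list_fake = []
--     for d in list_decl: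
--
--         first_fake = generate_fake_content(d, api)
--         second_fake = generate_fake_content(d, api2)
--
--         list_fake.append(first_fake)
--         list_fake.append(second_fake)
--
--     return list_fake
-- ===== SOURCE B (Python) =====
-- def inject_PAM(arff_obj, half_decl, api, api2):
--     seen = set()
--     list_fake = []
--     for i in range(half_decl):
--         d = str(arff_obj['data'][i]).split("', '")[0].replace("['", "")
--         if d not in seen:
--             seen.add(d)
--             list_fake.append([d, api])
--             list_fake.append([d, api2])
--     return list_fake
-- ===== Notes on version B (the rewrite author's own statement) =====
-- stated objective: simpler
-- what changed: Single fused pass over the first half_decl rows with a seen-set: each new declaration immediately emits its two fake pairs, dropping the intermediate list_decl, the dict.fromkeys dedup phase and the generate_fake_content helper.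
import Mathlib
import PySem

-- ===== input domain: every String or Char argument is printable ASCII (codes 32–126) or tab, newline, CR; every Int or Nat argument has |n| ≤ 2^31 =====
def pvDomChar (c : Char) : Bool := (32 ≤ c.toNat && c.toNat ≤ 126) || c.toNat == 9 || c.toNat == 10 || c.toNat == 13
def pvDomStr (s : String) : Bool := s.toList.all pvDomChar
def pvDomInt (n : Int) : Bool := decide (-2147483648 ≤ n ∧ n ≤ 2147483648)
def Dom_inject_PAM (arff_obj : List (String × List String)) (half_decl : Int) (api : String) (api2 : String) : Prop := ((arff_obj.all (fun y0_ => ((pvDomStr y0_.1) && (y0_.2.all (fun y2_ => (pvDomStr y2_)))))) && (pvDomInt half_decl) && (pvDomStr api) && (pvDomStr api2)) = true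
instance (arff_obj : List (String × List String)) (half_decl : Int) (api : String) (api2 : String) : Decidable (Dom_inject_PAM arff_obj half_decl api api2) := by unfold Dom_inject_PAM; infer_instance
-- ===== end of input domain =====

-- B fuses A's three phases (extract list, dict.fromkeys dedup, expand) into one pass with a seen-set,
-- emitting both fake pairs as soon as a new declaration appears; objective: simpler.

-- shared extraction of the declaration substring: str(data[i]).split("', '")[0].replace("['", "")
def pvExtract (data : List String) (i : Int) : String :=
  PySem.Str.replace (PySem.List.pyGetD ((PySem.Str.split? (PySem.List.pyGetD data i "") "', '").getD []) 0 "") "['" ""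

-- ===== PORT A =====
def generate_fake_content (declaration api_fake : String) : List String :=
  ([] ++ [declaration]) ++ [api_fake]

def inject_PAM (arff_obj : List (String × List String)) (half_decl : Int) (api : String) (api2 : String) : List (List String) :=
  let data := (PySem.Dict.mk arff_obj).getD "data" []
  let list_decl := (PySem.List.pyRange 0 half_decl 1).foldl
    (fun acc i => acc ++ [pvExtract data i]) []
  let list_decl2 := PySem.List.dedup list_decl
  list_decl2.foldl
    (fun acc d => (acc ++ [generate_fake_content d api]) ++ [generate_fake_content d api2]) []

-- ===== PORT B =====
def pvLoopB (data : List String) (api api2 : String) : List Int → PySem.Set String → List (List String) → List (List String)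
  | [], _, out => out
  | i :: rest, seen, out =>
    let d := pvExtract data i
    if PySem.Set.contains seen d then
      pvLoopB data api api2 rest seen out
    else
      pvLoopB data api api2 rest (PySem.Set.add seen d) (out ++ [[d, api], [d, api2]])

def inject_PAM_alt (arff_obj : List (String × List String)) (half_decl : Int) (api : String) (api2 : String) : List (List String) :=
  let data := (PySem.Dict.mk arff_obj).getD "data" []
  pvLoopB data api api2 (PySem.List.pyRange 0 half_decl 1) PySem.Set.empty []

-- ===== PRECONDITION & SPEC =====
-- For half_decl > 0 the loop accesses arff_obj['data'][i]: A raises KeyError when "data" is absent and IndexError when half_decl exceeds len(arff_obj['data']); exactly those inputs are excluded (for half_decl ≤ 0 nothing is accessed and A returns []).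
def Pre_inject_PAM (arff_obj : List (String × List String)) (half_decl : Int) (api : String) (api2 : String) : Prop :=
  half_decl ≤ 0 ∨
  ((PySem.Dict.mk arff_obj).contains "data" = true ∧
   half_decl ≤ (((PySem.Dict.mk arff_obj).getD "data" []).length : Int))
instance (arff_obj : List (String × List String)) (half_decl : Int) (api : String) (api2 : String) : Decidable (Pre_inject_PAM arff_obj half_decl api api2) := by unfold Pre_inject_PAM; infer_instance

def pvWitness_inject_PAM : (List (String × List String)) × Int × String × String :=
  ([("data", ["['a.b()', 'c.d()']", "['e.f()', 'g.h()']"])], 2, "apiX", "apiY")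

def Spec_inject_PAM (arff_obj : List (String × List String)) (half_decl : Int) (api : String) (api2 : String) (out : List (List String)) : Prop := out = inject_PAM_alt arff_obj half_decl api api2
instance (arff_obj : List (String × List String)) (half_decl : Int) (api : String) (api2 : String) (out : List (List String)) : Decidable (Spec_inject_PAM arff_obj half_decl api api2 out) := by unfold Spec_inject_PAM; infer_instance

-- ===== CLAIM (what is proved, stated in full; the proofs are below) =====
def Claim_equal_inject_PAM : Prop := ∀ (arff_obj : List (String × List String)) (half_decl : Int) (api : String) (api2 : String), Dom_inject_PAM arff_obj half_decl api api2 → Pre_inject_PAM arff_obj half_decl api api2 → Spec_inject_PAM arff_obj half_decl api api2 (inject_PAM arff_obj half_decl api api2)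

-- ===== LEMMAS AND PROOFS =====

-- first-occurrence elements of L that are NOT already in seen, in order
def pvNewD : List String → List String → List String
  | [], _ => []
  | d :: rest, seen => if d ∈ seen then pvNewD rest seen else d :: pvNewD rest (seen ++ [d])

theorem pvFoldl_add_eq (L seen : List String) :
    L.foldl PySem.Set.add seen = seen ++ pvNewD L seen := by
  induction L generalizing seen with
  | nil => simp [pvNewD]
  | cons d rest ih =>
    simp only [List.foldl_cons, pvNewD]
    by_cases h : d ∈ seen
    · rw [PySem.Set.add_of_mem h, ih]; simp [h]
    · rw [PySem.Set.add_of_not_mem h, ih]; simp [h]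

theorem pvLoopB_eq (data : List String) (api api2 : String) :
    ∀ (idxs : List Int) (seen : PySem.Set String) (out : List (List String)),
      pvLoopB data api api2 idxs seen out =
        out ++ (pvNewD (idxs.map (pvExtract data)) seen).flatMap
          (fun d => [[d, api], [d, api2]]) := by
  intro idxs
  induction idxs with
  | nil => intro seen out; simp [pvLoopB, pvNewD]
  | cons i rest ih =>
    intro seen out
    simp only [pvLoopB, List.map_cons, pvNewD]
    by_cases h : pvExtract data i ∈ seen
    · have hc : PySem.Set.contains seen (pvExtract data i) = true :=
        (PySem.Set.contains_iff seen (pvExtract data i)).mpr h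
      rw [hc, if_pos rfl, ih, if_pos h]
    · have hc : PySem.Set.contains seen (pvExtract data i) = false :=
        Bool.eq_false_iff.mpr (fun hcb => h ((PySem.Set.contains_iff seen (pvExtract data i)).mp hcb))
      rw [hc]
      simp only [Bool.false_eq_true, if_false, if_neg h]
      rw [ih, PySem.Set.add_of_not_mem h]
      simp

theorem inject_PAM_spec : Claim_equal_inject_PAM := by
  intro arff_obj half_decl api api2 _ _
  unfold Spec_inject_PAM
  simp only [inject_PAM, inject_PAM_alt]
  rw [PySem.List.foldl_append_singleton_eq_map, List.nil_append,
      PySem.List.dedup_eq_ofList, PySem.Set.ofList_eq_foldl, pvFoldl_add_eq,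
      List.nil_append, pvLoopB_eq]
  simp only [List.nil_append, generate_fake_content, List.append_assoc]
  rw [PySem.List.foldl_append_eq_flatMap]
  simp [PySem.Set.empty]
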